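-- pv_equiv track=rewrite | github.com/haziq21/letter-boxed-solver | py-src/letterboxed.py | get_allowed_words
-- ===== SOURCE A (Python) =====
-- from itertools import pairwise, product, chain
-- from collections.abc import Collection
--
-- def get_allowed_words(dictionary: Collection[str], sides: Collection[str]) -> set[str]:
--     """
--     Get all words from the dictionary that can be formed with the letters in `sides`.
--     Following the rules of the game, two letters from the same side are not allowed
--     to be used consecutively, and the minimum number of letters in a word is 2.
--     """
--     allowed_letters = set("".join(sides))
--     disallowed_pairs = set(chain.from_iterable(product(s, repeat=2) for s in sides))
--     return set(
--         w
--         for w in dictionary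
--         # Minimum word length is 3
--         if len(w) >= 3
--         # The word must only use letters from the allowed letters
--         and set(w) <= allowed_letters
--         # The word must not contain two consecutive letters from the same side
--         and all(p not in disallowed_pairs for p in pairwise(w))
--     )
-- ===== SOURCE B (Python) =====
-- def get_allowed_words(dictionary, sides):
--     # Union of all letters appearing on any side.
--     letters = set()
--     for s in sides:
--         letters.update(s)
--     result = set()
--     for w in dictionary:
--         if (len(w) >= 3
--                 and not (set(w) - letters)
--                 and not any(a + b in w for s in sides for a in s for b in s)):
--             result.add(w)
--     return result
-- ===== Notes on version B (the rewrite author's own statement) =====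
-- stated objective: alternative
-- what changed: A precomputes a set of all disallowed letter pairs and scans each word's adjacent pairs against it; B never scans adjacency at all: for each word it tests, per side and per ordered letter pair of that side, whether that two-letter bigram occurs in the word as a substring, and replaces the subset check by emptiness of a set difference.
import Mathlib
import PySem

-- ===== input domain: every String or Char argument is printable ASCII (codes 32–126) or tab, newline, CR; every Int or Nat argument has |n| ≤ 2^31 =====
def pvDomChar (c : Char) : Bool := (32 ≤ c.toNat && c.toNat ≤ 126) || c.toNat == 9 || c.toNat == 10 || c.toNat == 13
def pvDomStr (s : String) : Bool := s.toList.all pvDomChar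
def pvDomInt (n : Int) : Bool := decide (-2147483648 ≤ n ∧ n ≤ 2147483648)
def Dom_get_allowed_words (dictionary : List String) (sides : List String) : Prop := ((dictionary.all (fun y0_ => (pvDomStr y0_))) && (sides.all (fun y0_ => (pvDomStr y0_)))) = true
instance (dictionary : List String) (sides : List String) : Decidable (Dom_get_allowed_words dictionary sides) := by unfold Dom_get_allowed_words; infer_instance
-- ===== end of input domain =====

-- B drops A's precomputed disallowed-pair set and adjacent-pair scan: per word it
-- substring-searches each side's ordered letter bigrams, and replaces the subset
-- check by an empty set difference (alternative decomposition, not claimed faster).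

-- ===== PORT A =====
def get_allowed_words (dictionary : List String) (sides : List String) : List String :=
  let allowed_letters : PySem.Set Char := PySem.Set.ofList (PySem.Str.join "" sides).toList
  let disallowed_pairs : PySem.Set (Char × Char) :=
    PySem.Set.ofList (sides.flatMap (fun s => s.toList.flatMap (fun a => s.toList.map (fun b => (a, b)))))
  PySem.Set.ofList (dictionary.filter (fun w =>
    decide (3 ≤ w.toList.length)
    && PySem.Set.issubset (PySem.Set.ofList w.toList) allowed_letters
    && (w.toList.zip w.toList.tail).all (fun p => !(PySem.Set.contains disallowed_pairs p))))

-- ===== PORT B =====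
def get_allowed_words_alt (dictionary : List String) (sides : List String) : List String :=
  let letters : PySem.Set Char :=
    sides.foldl (fun acc s => PySem.Set.update acc s.toList) PySem.Set.empty
  dictionary.foldl (fun result w =>
    if decide (3 ≤ w.toList.length)
       && (PySem.Set.diff (PySem.Set.ofList w.toList) letters).isEmpty
       && !(sides.any (fun s => s.toList.any (fun a => s.toList.any (fun b =>
             PySem.Str.isIn (String.ofList [a, b]) w))))
    then PySem.Set.add result w else result)
    PySem.Set.empty

-- ===== PRECONDITION & SPEC =====
def Spec_get_allowed_words (dictionary : List String) (sides : List String) (out : List String) : Prop := out = get_allowed_words_alt dictionary sides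
instance (dictionary : List String) (sides : List String) (out : List String) : Decidable (Spec_get_allowed_words dictionary sides out) := by unfold Spec_get_allowed_words; infer_instance

-- ===== CLAIM (what is proved, stated in full; the proofs are below) =====
def Claim_equal_get_allowed_words : Prop := ∀ (dictionary : List String) (sides : List String), Dom_get_allowed_words dictionary sides → Spec_get_allowed_words dictionary sides (get_allowed_words dictionary sides)

-- ===== LEMMAS AND PROOFS =====

-- filtering then inserting = one loop with a conditional insert
theorem pv_foldl_filter_add {α : Type} [BEq α] (p : α → Bool) :
    ∀ (l : List α) (acc : PySem.Set α),
      (l.filter p).foldl PySem.Set.add acc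
        = l.foldl (fun acc w => if p w then PySem.Set.add acc w else acc) acc := by
  intro l
  induction l with
  | nil => intro acc; rfl
  | cons x xs ih =>
    intro acc
    by_cases h : p x = true
    · simp [h, ih]
    · simp [h, ih]

-- letters of "".join(sides)
theorem pv_mem_join_nil : ∀ (ls : List (List Char)) (c : Char),
    c ∈ PySem.Chars.join [] ls ↔ ∃ l ∈ ls, c ∈ l := by
  intro ls
  induction ls with
  | nil => intro c; simp [PySem.Chars.join_nil]
  | cons l ls ih =>
    intro c
    cases ls with
    | nil => simp [PySem.Chars.join_singleton]
    | cons l' ls' =>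
      rw [PySem.Chars.join_cons_cons]
      simp only [List.append_nil, List.mem_append, ih]
      simp

theorem pv_mem_allowed (sides : List String) (c : Char) :
    c ∈ (PySem.Str.join "" sides).toList ↔ ∃ s ∈ sides, c ∈ s.toList := by
  rw [PySem.Str.toList_join]
  simp only [String.toList_empty]
  rw [pv_mem_join_nil]
  simp

-- B's letter union: membership
theorem pv_mem_letters (sides : List String) (c : Char) :
    c ∈ sides.foldl (fun acc s => PySem.Set.update acc s.toList) PySem.Set.empty
      ↔ ∃ s ∈ sides, c ∈ s.toList := by
  suffices h : ∀ (ss : List String) (acc : PySem.Set Char),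
      c ∈ ss.foldl (fun acc s => PySem.Set.update acc s.toList) acc
        ↔ c ∈ acc ∨ ∃ s ∈ ss, c ∈ s.toList by
    rw [h]
    simp [PySem.Set.empty]
  intro ss
  induction ss with
  | nil => intro acc; simp
  | cons s ss ih =>
    intro acc
    rw [List.foldl_cons, ih, PySem.Set.mem_update]
    simp only [List.mem_cons, exists_eq_or_imp]
    tauto

-- a two-letter infix is exactly an adjacent pair
theorem pv_infix_pair (a b : Char) :
    ∀ (cs : List Char), [a, b] <:+: cs ↔ (a, b) ∈ cs.zip cs.tail := by
  intro cs
  induction cs with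
  | nil => simp
  | cons c rest ih =>
    rw [List.infix_cons_iff, ih]
    cases rest with
    | nil =>
      simp only [List.tail_cons, List.tail_nil, List.zip_nil_right, List.not_mem_nil, or_false, iff_false]
      intro h
      have := h.length_le
      simp at this
    | cons d rest' =>
      simp only [List.zip_cons_cons, List.tail_cons, List.mem_cons]
      constructor
      · rintro (hpre | hmem)
        · left
          rcases hpre with ⟨t, ht⟩
          simp only [List.cons_append] at ht
          injection ht with h1 h2
          injection h2 with h3 _
          simp [h1, h3]
        · right; exact hmem
      · rintro (hab | hmem)
        · left
          have h1 : c = a := congrArg Prod.fst hab.symm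
          have h2 : d = b := congrArg Prod.snd hab.symm
          subst h1; subst h2
          exact ⟨rest', rfl⟩
        · right; exact hmem

-- the two per-word predicates agree
theorem pv_pred_eq (sides : List String) (w : String) :
    (decide (3 ≤ w.toList.length)
      && PySem.Set.issubset (PySem.Set.ofList w.toList) (PySem.Set.ofList (PySem.Str.join "" sides).toList)
      && (w.toList.zip w.toList.tail).all (fun p => !(PySem.Set.contains
            (PySem.Set.ofList (sides.flatMap (fun s => s.toList.flatMap (fun a => s.toList.map (fun b => (a, b)))))) p)))
    = (decide (3 ≤ w.toList.length)
      && (PySem.Set.diff (PySem.Set.ofList w.toList)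
            (sides.foldl (fun acc s => PySem.Set.update acc s.toList) PySem.Set.empty)).isEmpty
      && !(sides.any (fun s => s.toList.any (fun a => s.toList.any (fun b =>
             PySem.Str.isIn (String.ofList [a, b]) w))))) := by
  rw [Bool.eq_iff_iff]
  simp only [Bool.and_eq_true, decide_eq_true_eq]
  constructor
  · rintro ⟨⟨hlen, hsub⟩, hpairs⟩
    refine ⟨⟨hlen, ?_⟩, ?_⟩
    · rw [List.isEmpty_iff, List.eq_nil_iff_forall_not_mem]
      intro c hc
      rw [PySem.Set.mem_diff] at hc
      rcases hc with ⟨hcw, hcl⟩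
      apply hcl
      rw [pv_mem_letters]
      have := (PySem.Set.issubset_iff _ _).mp hsub c hcw
      rw [PySem.Set.mem_ofList, pv_mem_allowed] at this
      exact this
    · rw [Bool.not_eq_eq_eq_not, Bool.not_true, ← Bool.not_eq_true]
      intro hcontra
      simp only [List.any_eq_true] at hcontra
      obtain ⟨s, hs, a, ha, b, hb, hin⟩ := hcontra
      rw [List.all_eq_true] at hpairs
      rw [PySem.Str.isIn_iff_infix, String.toList_ofList] at hin
      have hmem : (a, b) ∈ w.toList.zip w.toList.tail := by
        rw [← pv_infix_pair]; exact hin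
      have := hpairs (a, b) hmem
      rw [Bool.not_eq_eq_eq_not, Bool.not_true, ← Bool.not_eq_true,
        PySem.Set.contains_iff, PySem.Set.mem_ofList] at this
      exact this (by
        rw [List.mem_flatMap]
        exact ⟨s, hs, by rw [List.mem_flatMap]; exact ⟨a, ha, List.mem_map.mpr ⟨b, hb, rfl⟩⟩⟩)
  · rintro ⟨⟨hlen, hemp⟩, hnone⟩
    rw [List.isEmpty_iff, List.eq_nil_iff_forall_not_mem] at hemp
    refine ⟨⟨hlen, ?_⟩, ?_⟩
    · rw [PySem.Set.issubset_iff]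
      intro c hc
      rw [PySem.Set.mem_ofList, pv_mem_allowed]
      rw [← pv_mem_letters]
      by_contra hcl
      exact hemp c (by rw [PySem.Set.mem_diff]; exact ⟨hc, hcl⟩)
    · rw [List.all_eq_true]
      rintro ⟨a, b⟩ hp
      rw [Bool.not_eq_eq_eq_not, Bool.not_true, ← Bool.not_eq_true,
        PySem.Set.contains_iff, PySem.Set.mem_ofList]
      intro hmem
      rw [List.mem_flatMap] at hmem
      obtain ⟨s, hs, hmem⟩ := hmem
      rw [List.mem_flatMap] at hmem
      obtain ⟨a', ha', hmem⟩ := hmem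
      obtain ⟨b', hb', hab⟩ := List.mem_map.mp hmem
      have ha1 : a' = a := congrArg Prod.fst hab
      have hb1 : b' = b := congrArg Prod.snd hab
      subst ha1; subst hb1
      rw [Bool.not_eq_eq_eq_not, Bool.not_true] at hnone
      rw [← Bool.not_eq_true] at hnone
      apply hnone
      simp only [List.any_eq_true]
      refine ⟨s, hs, a', ha', b', hb', ?_⟩
      rw [PySem.Str.isIn_iff_infix, String.toList_ofList, pv_infix_pair]
      exact hp

-- ===== VERDICT (by name: the statement is the Claim_ definition above) =====
theorem get_allowed_words_spec : Claim_equal_get_allowed_words := by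
  intro dictionary sides _
  unfold Spec_get_allowed_words get_allowed_words get_allowed_words_alt
  rw [PySem.Set.ofList_eq_foldl, pv_foldl_filter_add]
  apply List.foldl_ext
  intro acc w _
  rw [pv_pred_eq]
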